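-- pv_equiv track=rewrite | github.com/SVCE-ACM/A-December-of-Algorithms-2019 | December-26/python_UjjwalPrahladka_Dec26.py | give_blueprint
-- ===== SOURCE A (Python) =====
-- def give_blueprint(n):
--     #gives the blueprint. Eg. if n = 3 temp= [1,2,1], n = 5 temp = [1,2,3,2,1]
--     temp = [1]
--     mid = n // 2
--     for i in range(1, mid + 1):
--         temp.append(temp[-1] + 1)
--     for i in range(mid + 1, n):
--         temp.append(temp[-1] - 1)
--     return temp
-- ===== SOURCE B (Python) =====
-- def give_blueprint(n):
--     mid = n // 2
--     return [1] + list(range(2, mid + 2)) + list(range(mid, 2 * mid + 1 - n, -1))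
-- ===== Notes on version B (the rewrite author's own statement) =====
-- stated objective: simpler
-- what changed: Replaces the two append-to-last accumulation loops with a closed-form construction: the ascending and descending halves are produced directly as two range() lists concatenated after the seed [1].
import Mathlib
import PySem

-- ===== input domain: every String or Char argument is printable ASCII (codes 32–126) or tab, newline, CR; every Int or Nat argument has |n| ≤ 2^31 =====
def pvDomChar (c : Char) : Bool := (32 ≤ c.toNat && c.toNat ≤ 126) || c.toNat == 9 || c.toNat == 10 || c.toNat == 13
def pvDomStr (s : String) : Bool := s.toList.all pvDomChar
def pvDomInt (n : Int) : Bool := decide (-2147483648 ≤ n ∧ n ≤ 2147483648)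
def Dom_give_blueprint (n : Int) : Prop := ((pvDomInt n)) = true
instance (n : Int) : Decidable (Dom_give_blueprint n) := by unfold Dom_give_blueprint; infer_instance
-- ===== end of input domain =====

-- B replaces A's two append-to-previous-element loops with a closed-form build:
-- the seed [1] followed by the ascending and descending halves as two range lists (objective: simpler).

-- ===== PORT A =====
def give_blueprint (n : Int) : List Int :=
  let temp : List Int := [1]
  let mid := PySem.Int.floordiv n 2
  let temp := (PySem.List.pyRange 1 (mid + 1) 1).foldl
    (fun t _ => t ++ [(PySem.List.pyGet? t (-1)).getD 0 + 1]) temp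
  let temp := (PySem.List.pyRange (mid + 1) n 1).foldl
    (fun t _ => t ++ [(PySem.List.pyGet? t (-1)).getD 0 - 1]) temp
  temp

-- ===== PORT B =====
def give_blueprint_alt (n : Int) : List Int :=
  let mid := PySem.Int.floordiv n 2
  [1] ++ PySem.List.pyRange 2 (mid + 2) 1 ++ PySem.List.pyRange mid (2 * mid + 1 - n) (-1)

-- ===== PRECONDITION & SPEC =====
def Spec_give_blueprint (n : Int) (out : List Int) : Prop := out = give_blueprint_alt n
instance (n : Int) (out : List Int) : Decidable (Spec_give_blueprint n out) := by unfold Spec_give_blueprint; infer_instance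

-- ===== CLAIM (what is proved, stated in full; the proofs are below) =====
def Claim_equal_give_blueprint : Prop := ∀ (n : Int), Dom_give_blueprint n → Spec_give_blueprint n (give_blueprint n)

-- ===== LEMMAS AND PROOFS =====

-- Iterating "append last + d" k times onto t ++ [x] yields t ++ [x, x+d, …] with last x + d*k.
theorem pv_iter_append_last (d : Int) :
    ∀ (r : List Int) (t : List Int) (x : Int),
      r.foldl (fun s _ => s ++ [(PySem.List.pyGet? s (-1)).getD 0 + d]) (t ++ [x]) =
        (t ++ (List.range r.length).map (fun (i : Nat) => x + d * (i : Int))) ++ [x + d * r.length] := by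
  intro r
  induction r with
  | nil => intro t x; simp
  | cons a r ih =>
    intro t x
    have hstep : (t ++ [x]) ++ [(PySem.List.pyGet? (t ++ [x]) (-1)).getD 0 + d]
        = (t ++ [x]) ++ [x + d] := by
      rw [PySem.List.pyGet?_neg_one_append_singleton]
      rfl
    calc (a :: r).foldl (fun s _ => s ++ [(PySem.List.pyGet? s (-1)).getD 0 + d]) (t ++ [x])
        = r.foldl (fun s _ => s ++ [(PySem.List.pyGet? s (-1)).getD 0 + d]) ((t ++ [x]) ++ [x + d]) := by
          rw [List.foldl_cons, hstep]
      _ = ((t ++ [x]) ++ (List.range r.length).map (fun (i : Nat) => (x + d) + d * (i : Int))) ++ [(x + d) + d * r.length] := ih (t ++ [x]) (x + d)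
      _ = (t ++ (List.range (a :: r).length).map (fun (i : Nat) => x + d * (i : Int))) ++ [x + d * (a :: r).length] := by
          rw [List.length_cons, List.range_succ_eq_map, List.map_cons, List.map_map]
          have hmaps : (List.range r.length).map (fun (i : Nat) => (x + d) + d * (i : Int)) ++ [(x + d) + d * (r.length : Int)]
              = (List.range r.length).map ((fun (i : Nat) => x + d * (i : Int)) ∘ Nat.succ) ++ [x + d * ((r.length : Int) + 1)] := by
            congr 1
            · apply List.map_congr_left
              intro i _
              simp only [Function.comp_apply]
              push_cast
              ring
            · simp only [List.cons.injEq, and_true]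
              ring
          push_cast
          simp only [mul_zero, add_zero, List.append_assoc, List.cons_append]
          rw [hmaps]
          simp

theorem pv_floordiv_bounds (n : Int) :
    2 * PySem.Int.floordiv n 2 ≤ n ∧ n < 2 * PySem.Int.floordiv n 2 + 2 := by
  have h2 : PySem.Int.floordiv n 2 = n / 2 := by
    simp [PySem.Int.floordiv, Int.fdiv_eq_ediv]
  rw [h2]
  omega

-- [1, 2, …, M, M+1] read as ascending-half ++ last  vs  seed 1 ++ ascending range
theorem pv_asc (M : Nat) :
    (List.range M).map (fun (i : Nat) => (1 : Int) + 1 * (i : Int)) ++ [1 + 1 * (M : Int)] =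
      1 :: (List.range M).map (fun (k : Nat) => (2 : Int) + (k : Int)) := by
  have h : (List.range (M + 1)).map (fun (i : Nat) => (1 : Int) + 1 * (i : Int)) =
      (List.range M).map (fun (i : Nat) => (1 : Int) + 1 * (i : Int)) ++ [1 + 1 * (M : Int)] := by
    rw [List.range_succ]; simp
  rw [← h, List.range_succ_eq_map, List.map_cons, List.map_map]
  simp only [Nat.cast_zero, mul_zero, add_zero]
  congr 1
  apply List.map_congr_left
  intro i _
  simp only [Function.comp_apply]
  push_cast
  ring

-- [M+1, M, …] read as descending-body ++ last  vs  peak ++ descending range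
theorem pv_desc (y : Int) (K : Nat) :
    (List.range K).map (fun (i : Nat) => y + (-1) * (i : Int)) ++ [y + (-1) * (K : Int)] =
      y :: (List.range K).map (fun (k : Nat) => (y - 1) + -(k : Int)) := by
  have h : (List.range (K + 1)).map (fun (i : Nat) => y + (-1) * (i : Int)) =
      (List.range K).map (fun (i : Nat) => y + (-1) * (i : Int)) ++ [y + (-1) * (K : Int)] := by
    rw [List.range_succ]; simp
  rw [← h, List.range_succ_eq_map, List.map_cons, List.map_map]
  simp only [Nat.cast_zero, mul_zero, add_zero]
  congr 1
  apply List.map_congr_left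
  intro i _
  simp only [Function.comp_apply]
  push_cast
  ring

-- ===== VERDICT (by name: the statement is the Claim_ definition above) =====
theorem give_blueprint_spec : Claim_equal_give_blueprint := by
  intro n _
  unfold Spec_give_blueprint give_blueprint give_blueprint_alt
  simp only [sub_eq_add_neg]
  set m := PySem.Int.floordiv n 2 with hm
  obtain ⟨hlo, hhi⟩ := pv_floordiv_bounds n
  rw [← hm] at hlo hhi
  have h1 : ([1] : List Int) = [] ++ [1] := rfl
  rw [h1, pv_iter_append_last 1, pv_iter_append_last (-1),
    PySem.List.pyRange_one 1 (m + 1), PySem.List.pyRange_one 2 (m + 2),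
    PySem.List.pyRange_one (m + 1) n, PySem.List.pyRange_neg_one]
  simp only [List.length_map, List.length_range, List.nil_append]
  have e1 : (m + 1 - 1).toNat = m.toNat := by omega
  have e2 : (m + 2 - 2).toNat = m.toNat := by omega
  have e4 : (m - (2 * m + 1 + -n)).toNat = (n - (m + 1)).toNat := by omega
  rw [e1, e2, e4]
  set M := m.toNat with hM
  set K := (n - (m + 1)).toNat with hK
  rw [List.append_assoc, pv_desc (1 + 1 * (M : Int)) K, List.append_cons, pv_asc M]
  by_cases hmneg : m < 0
  · have eM : M = 0 := by omega
    have eK : K = 0 := by omega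
    simp [eM, eK]
  · have hcast : ((M : Int)) = m := by omega
    simp only [List.cons_append, List.nil_append]
    congr 2
    apply List.map_congr_left
    intro k _
    omega
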